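-- pv_equiv track=rewrite | github.com/speediedan/interpretune | src/interpretune/base/analysis.py | default_sae_hook_match_fn
-- ===== SOURCE A (Python) =====
-- from typing import Literal, NamedTuple, Optional, Any, Callable, Sequence, Union, List, Dict
--
-- def default_sae_hook_match_fn(in_name: str, hook_point_suffix: str = "hook_sae_acts_post",
--                               hook_point_prefix: str = 'blocks',
--                               layers: int | Sequence[int] | None = None) -> bool:
--     suffix_matched = in_name.endswith(f"{hook_point_suffix}")
--     if suffix_matched and layers is not None:
--         if isinstance(layers, int):
--             layers = [layers]
--         return any(in_name.startswith(f"{hook_point_prefix}.{layer}.") for layer in layers)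
--     return suffix_matched
-- ===== SOURCE B (Python) =====
-- def default_sae_hook_match_fn(in_name: str, hook_point_suffix: str = "hook_sae_acts_post",
--                               hook_point_prefix: str = 'blocks',
--                               layers=None) -> bool:
--     suffix_matched = in_name.endswith(hook_point_suffix)
--     if not suffix_matched or layers is None:
--         return suffix_matched
--     if isinstance(layers, int):
--         layers = [layers]
--     pre = hook_point_prefix + "."
--     if not in_name.startswith(pre):
--         return False
--     token, sep, _ = in_name[len(pre):].partition(".")
--     return sep == "." and token in {str(layer) for layer in layers}
-- ===== Notes on version B (the rewrite author's own statement) =====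
-- stated objective: alternative
-- what changed: Instead of building and scanning one candidate prefix string per layer, B checks the hook-point prefix once, slices out the single layer token up to the following dot and does one set-membership lookup against the stringified layer numbers.
import Mathlib
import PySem

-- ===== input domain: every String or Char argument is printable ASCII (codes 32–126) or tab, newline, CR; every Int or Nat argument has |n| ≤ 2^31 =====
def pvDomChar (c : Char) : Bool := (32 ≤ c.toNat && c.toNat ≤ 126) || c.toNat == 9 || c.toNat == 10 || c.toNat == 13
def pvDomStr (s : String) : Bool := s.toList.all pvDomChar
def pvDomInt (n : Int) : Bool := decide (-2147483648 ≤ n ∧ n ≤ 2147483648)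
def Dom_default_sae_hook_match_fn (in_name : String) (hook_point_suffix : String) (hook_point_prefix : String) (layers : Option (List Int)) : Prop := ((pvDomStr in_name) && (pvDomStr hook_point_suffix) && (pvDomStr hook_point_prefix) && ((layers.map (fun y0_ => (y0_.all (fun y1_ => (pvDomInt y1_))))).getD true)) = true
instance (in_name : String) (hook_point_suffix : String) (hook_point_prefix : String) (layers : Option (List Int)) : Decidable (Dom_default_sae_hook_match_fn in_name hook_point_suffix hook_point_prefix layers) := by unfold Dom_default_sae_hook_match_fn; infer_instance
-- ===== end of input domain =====

-- B parses the single layer token after the prefix once and does one set lookup, instead of A's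
-- scan over L generated candidate prefix strings; equivalence is proved on the whole domain.

-- ===== PORT A =====
def default_sae_hook_match_fn (in_name : String) (hook_point_suffix : String) (hook_point_prefix : String) (layers : Option (List Int)) : Bool :=
  let suffix_matched := PySem.Str.endswith in_name hook_point_suffix
  match layers with
  | some ls =>
      if suffix_matched then
        ls.any (fun layer => PySem.Str.startswith in_name (hook_point_prefix ++ "." ++ PySem.Int.toStr layer ++ "."))
      else suffix_matched
  | none => suffix_matched

-- ===== PORT B =====
def default_sae_hook_match_fn_alt (in_name : String) (hook_point_suffix : String) (hook_point_prefix : String) (layers : Option (List Int)) : Bool :=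
  let suffix_matched := PySem.Str.endswith in_name hook_point_suffix
  if !suffix_matched then suffix_matched
  else
    match layers with
    | none => suffix_matched
    | some ls =>
        let pre := hook_point_prefix ++ "."
        if !PySem.Str.startswith in_name pre then false
        else
          -- in_name[len(pre):]: slice with the nonnegative start len(pre) is exactly List.drop on the code points (len ≥ 0, so .toNat is exact)
          let rest := in_name.toList.drop (PySem.Str.len pre).toNat
          -- rest.partition('.') ported by hand: token = chars before the first '.', sep nonempty iff '.' occurs (exact)
          let token := rest.takeWhile (fun c => c ≠ '.')
          let sep := rest.dropWhile (fun c => c ≠ '.')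
          !sep.isEmpty && PySem.Set.contains (PySem.Set.ofList (ls.map PySem.Int.toChars)) token

-- ===== PRECONDITION & SPEC =====
def Spec_default_sae_hook_match_fn (in_name : String) (hook_point_suffix : String) (hook_point_prefix : String) (layers : Option (List Int)) (out : Bool) : Prop := out = default_sae_hook_match_fn_alt in_name hook_point_suffix hook_point_prefix layers
instance (in_name : String) (hook_point_suffix : String) (hook_point_prefix : String) (layers : Option (List Int)) (out : Bool) : Decidable (Spec_default_sae_hook_match_fn in_name hook_point_suffix hook_point_prefix layers out) := by unfold Spec_default_sae_hook_match_fn; infer_instance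

-- ===== CLAIM (what is proved, stated in full; the proofs are below) =====
def Claim_equal_default_sae_hook_match_fn : Prop := ∀ (in_name : String) (hook_point_suffix : String) (hook_point_prefix : String) (layers : Option (List Int)), Dom_default_sae_hook_match_fn in_name hook_point_suffix hook_point_prefix layers → Spec_default_sae_hook_match_fn in_name hook_point_suffix hook_point_prefix layers (default_sae_hook_match_fn in_name hook_point_suffix hook_point_prefix layers)

-- ===== LEMMAS AND PROOFS =====

theorem digitChar_ne_dot (m : Nat) : Nat.digitChar m ≠ '.' := by
  rcases m with _|_|_|_|_|_|_|_|_|_|_|_|_|_|_|_|n <;> simp [Nat.digitChar]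

theorem toDigitsCore_no_dot (fuel : Nat) : ∀ (n : Nat) (acc : List Char),
    '.' ∉ acc → '.' ∉ Nat.toDigitsCore 10 fuel n acc := by
  induction fuel with
  | zero => intro n acc h; simpa [Nat.toDigitsCore] using h
  | succ f ih =>
      intro n acc h
      have hcons : '.' ∉ ((n % 10).digitChar :: acc) := by
        intro hm
        rcases List.mem_cons.mp hm with h1 | h2
        · exact digitChar_ne_dot _ h1.symm
        · exact h h2
      simp only [Nat.toDigitsCore]
      split
      · exact hcons
      · exact ih _ _ hcons

theorem toChars_no_dot (n : Int) : '.' ∉ PySem.Int.toChars n := by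
  unfold PySem.Int.toChars Nat.toDigits
  split_ifs
  · intro hm
    rcases List.mem_cons.mp hm with h1 | h2
    · exact absurd h1 (by decide)
    · exact toDigitsCore_no_dot _ _ _ (by simp) h2
  · exact toDigitsCore_no_dot _ _ _ (by simp)

theorem takeWhile_append_all {p : Char → Bool} (l₁ l₂ : List Char) (h : ∀ a ∈ l₁, p a = true) :
    (l₁ ++ l₂).takeWhile p = l₁ ++ l₂.takeWhile p := by
  induction l₁ with
  | nil => simp
  | cons x xs ih =>
      simp only [List.cons_append, List.takeWhile_cons, h x (by simp)]
      simp [ih (fun a ha => h a (by simp [ha]))]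

theorem dropWhile_append_all {p : Char → Bool} (l₁ l₂ : List Char) (h : ∀ a ∈ l₁, p a = true) :
    (l₁ ++ l₂).dropWhile p = l₂.dropWhile p := by
  induction l₁ with
  | nil => simp
  | cons x xs ih =>
      simp only [List.cons_append, List.dropWhile_cons, h x (by simp)]
      exact ih (fun a ha => h a (by simp [ha]))

theorem dropWhile_head_false {p : Char → Bool} (l : List Char) (x : Char) (xs : List Char)
    (h : l.dropWhile p = x :: xs) : p x = false := by
  induction l with
  | nil => simp at h
  | cons y ys ih =>
      by_cases hy : p y = true
      · exact ih (by simpa [List.dropWhile_cons, hy] using h)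
      · simp only [List.dropWhile_cons] at h
        rw [Bool.not_eq_true] at hy
        rw [hy] at h
        simp at h
        exact h.1 ▸ hy

theorem prefix_token (cs pcs tcs : List Char) (h : '.' ∉ tcs) :
    (pcs ++ (tcs ++ ['.'])) <+: cs ↔
      (pcs <+: cs ∧ (cs.drop pcs.length).takeWhile (fun c => c ≠ '.') = tcs ∧
        (cs.drop pcs.length).dropWhile (fun c => c ≠ '.') ≠ []) := by
  have hall : ∀ a ∈ tcs, (fun c => decide (c ≠ '.')) a = true := by
    intro a ha
    simp only [decide_eq_true_eq]
    intro he; exact h (he ▸ ha)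
  constructor
  · rintro ⟨t, ht⟩
    have hcs : cs = pcs ++ ((tcs ++ ['.']) ++ t) := by rw [← ht]; simp
    have hdrop : cs.drop pcs.length = (tcs ++ ['.']) ++ t := by rw [hcs, List.drop_left]
    refine ⟨⟨(tcs ++ ['.']) ++ t, by rw [hcs]⟩, ?_, ?_⟩
    · rw [hdrop, List.append_assoc, takeWhile_append_all _ _ hall]
      simp
    · rw [hdrop, List.append_assoc, dropWhile_append_all _ _ hall]
      simp
  · rintro ⟨⟨u, hu⟩, htk, hd⟩
    have hdrop : cs.drop pcs.length = u := by rw [← hu, List.drop_left]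
    rcases hx : (cs.drop pcs.length).dropWhile (fun c => decide (c ≠ '.')) with _ | ⟨x, xs⟩
    · exact absurd hx hd
    · have hxdot : x = '.' := by
        have := dropWhile_head_false _ _ _ hx
        simpa using this
      have hsplit : cs.drop pcs.length = tcs ++ ('.' :: xs) := by
        rw [← htk]
        conv_lhs => rw [← List.takeWhile_append_dropWhile (p := fun c => decide (c ≠ '.')) (l := cs.drop pcs.length)]
        rw [hx, hxdot]
      refine ⟨xs, ?_⟩
      rw [← hu]
      rw [hdrop] at hsplit
      rw [hsplit]
      simp

theorem startswith_prefix_iff (s p : String) :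
    PySem.Str.startswith s p = true ↔ p.toList <+: s.toList := by
  simp [PySem.Str.startswith_eq, PySem.Chars.startswith_iff]

theorem len_toNat_eq (s : String) : (PySem.Str.len s).toNat = s.toList.length := by
  simp [PySem.Str.len_eq]

theorem contains_ofList_map_iff (ls : List Int) (tk : List Char) :
    PySem.Set.contains (PySem.Set.ofList (ls.map PySem.Int.toChars)) tk = true ↔
      tk ∈ ls.map PySem.Int.toChars := by
  simp [PySem.Set.contains, PySem.Set.mem_ofList]

theorem big_toList (pfx : String) (l : Int) :
    (pfx ++ "." ++ PySem.Int.toStr l ++ ".").toList =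
      (pfx ++ ".").toList ++ (PySem.Int.toChars l ++ ['.']) := by
  simp [PySem.Int.toList_toStr]

theorem main_eq (in_name pfx : String) (ls : List Int) :
    ls.any (fun layer => PySem.Str.startswith in_name (pfx ++ "." ++ PySem.Int.toStr layer ++ ".")) =
      (if !PySem.Str.startswith in_name (pfx ++ ".") then false
       else
         let rest := in_name.toList.drop (PySem.Str.len (pfx ++ ".")).toNat
         let token := rest.takeWhile (fun c => c ≠ '.')
         let sep := rest.dropWhile (fun c => c ≠ '.')
         !sep.isEmpty && PySem.Set.contains (PySem.Set.ofList (ls.map PySem.Int.toChars)) token) := by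
  cases hst : PySem.Str.startswith in_name (pfx ++ ".") with
  | false =>
      simp only [Bool.not_false, if_pos]
      rw [List.any_eq_false]
      intro l hl hf
      have hbig : (pfx ++ "." ++ PySem.Int.toStr l ++ ".").toList <+: in_name.toList :=
        (startswith_prefix_iff _ _).mp hf
      have hpre : (pfx ++ ".").toList <+: in_name.toList := by
        refine List.IsPrefix.trans ?_ hbig
        rw [big_toList]
        exact List.prefix_append _ _
      rw [← startswith_prefix_iff] at hpre
      rw [hst] at hpre
      exact Bool.false_ne_true hpre
  | true =>
      have hpre : (pfx ++ ".").toList <+: in_name.toList := (startswith_prefix_iff _ _).mp hst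
      simp only [Bool.not_true, Bool.false_eq_true, if_false, len_toNat_eq]
      refine Bool.eq_iff_iff.mpr ?_
      rw [List.any_eq_true, Bool.and_eq_true, Bool.not_eq_true', List.isEmpty_eq_false_iff,
        contains_ofList_map_iff]
      constructor
      · rintro ⟨l, hl, hf⟩
        have hbig : (pfx ++ ".").toList ++ (PySem.Int.toChars l ++ ['.']) <+: in_name.toList := by
          rw [← big_toList]; exact (startswith_prefix_iff _ _).mp hf
        obtain ⟨-, htk, hd⟩ := (prefix_token _ _ _ (toChars_no_dot l)).mp hbig
        exact ⟨hd, by rw [htk]; exact List.mem_map_of_mem hl⟩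
      · rintro ⟨hd, hmem⟩
        obtain ⟨l, hl, htk⟩ := List.mem_map.mp hmem
        refine ⟨l, hl, ?_⟩
        rw [startswith_prefix_iff, big_toList]
        exact (prefix_token _ _ _ (toChars_no_dot l)).mpr ⟨hpre, htk.symm, hd⟩

theorem default_sae_hook_match_fn_spec : Claim_equal_default_sae_hook_match_fn := by
  intro in_name sfx pfx layers _
  unfold Spec_default_sae_hook_match_fn default_sae_hook_match_fn default_sae_hook_match_fn_alt
  cases layers with
  | none => cases PySem.Str.endswith in_name sfx <;> simp
  | some ls =>
      cases hsuf : PySem.Str.endswith in_name sfx with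
      | false => simp
      | true => simpa using main_eq in_name pfx ls
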